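-- pv_equiv track=rewrite | github.com/lgi2p/TDwithRULES | thesis_code/TDO/experiments/truth_selection/adapted_model_selection.py | get_conf_max_delta_0_opt
-- ===== SOURCE A (Python) =====
-- def get_conf_max_delta_0_opt(d, conf_dict, v_children):
-- 	conf_list = list()
-- 	max_v = 0
-- 	set_of_elements = set()
-- 	for child in v_children:
-- 		if d + child in conf_dict:
-- 			if (conf_dict[d + child]> max_v):
-- 				max_v = conf_dict[d + child]
-- 				set_of_elements.clear()
-- 				set_of_elements.add(child)
-- 			elif (conf_dict[d + child]== max_v):
-- 				set_of_elements.add(child)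
--
-- 	return set_of_elements
-- ===== SOURCE B (Python) =====
-- def get_conf_max_delta_0_opt(d, conf_dict, v_children):
--     vals = [conf_dict.get(d + child) for child in v_children]
--     best = 0
--     for v in vals:
--         if v is not None and v > best:
--             best = v
--     return {child for child, v in zip(v_children, vals) if v == best}
-- ===== Notes on version B (the rewrite author's own statement) =====
-- stated objective: simpler
-- what changed: Replaces the single running-max scan with clear/re-add set bookkeeping by two plain passes: one computing the 0-floored maximum confidence, then a set comprehension selecting the children achieving it.
import Mathlib
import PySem

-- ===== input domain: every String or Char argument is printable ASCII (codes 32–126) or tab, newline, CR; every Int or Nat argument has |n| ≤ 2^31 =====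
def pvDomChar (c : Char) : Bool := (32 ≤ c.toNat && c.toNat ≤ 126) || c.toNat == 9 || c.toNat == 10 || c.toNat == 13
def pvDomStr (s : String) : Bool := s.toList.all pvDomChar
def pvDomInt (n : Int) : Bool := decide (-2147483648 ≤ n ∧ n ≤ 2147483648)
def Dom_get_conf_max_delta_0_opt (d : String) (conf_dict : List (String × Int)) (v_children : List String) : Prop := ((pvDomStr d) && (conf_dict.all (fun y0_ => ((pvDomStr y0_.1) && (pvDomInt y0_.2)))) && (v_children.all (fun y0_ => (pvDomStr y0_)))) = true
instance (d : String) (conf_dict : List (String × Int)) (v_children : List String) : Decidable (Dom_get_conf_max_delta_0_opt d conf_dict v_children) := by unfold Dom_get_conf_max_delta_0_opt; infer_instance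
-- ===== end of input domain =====

-- B replaces A's single running-max scan with clear/re-add set bookkeeping by two plain
-- passes (compute the 0-floored max confidence, then filter the children achieving it); simpler.

-- ===== PORT A =====
-- single pass, state (max_v, set_of_elements); clear() = restart from the empty set
def get_conf_max_delta_0_opt (d : String) (conf_dict : List (String × Int)) (v_children : List String) : List String :=
  (v_children.foldl (fun (st : Int × PySem.Set String) child =>
      match (PySem.Dict.mk conf_dict).get? (d ++ child) with
      | some c =>
          if c > st.1 then (c, PySem.Set.add PySem.Set.empty child)
          else if c = st.1 then (st.1, PySem.Set.add st.2 child)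
          else st
      | none => st)
    (0, PySem.Set.empty)).2

-- ===== PORT B =====
-- look each key up once (vals); pass 1: best = 0-floored maximum confidence;
-- pass 2: set comprehension over zip keeping the achievers
def get_conf_max_delta_0_opt_alt (d : String) (conf_dict : List (String × Int)) (v_children : List String) : List String :=
  let vals : List (Option Int) := v_children.map (fun child => (PySem.Dict.mk conf_dict).get? (d ++ child))
  let best : Int := vals.foldl (fun m v? =>
      match v? with
      | some v => if v > m then v else m
      | none => m) 0
  (v_children.zip vals).foldl (fun (s : PySem.Set String) (p : String × Option Int) =>
      if p.2 = some best then PySem.Set.add s p.1 else s) PySem.Set.empty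

-- ===== PRECONDITION & SPEC =====
def Spec_get_conf_max_delta_0_opt (d : String) (conf_dict : List (String × Int)) (v_children : List String) (out : List String) : Prop := out = get_conf_max_delta_0_opt_alt d conf_dict v_children
instance (d : String) (conf_dict : List (String × Int)) (v_children : List String) (out : List String) : Decidable (Spec_get_conf_max_delta_0_opt d conf_dict v_children out) := by unfold Spec_get_conf_max_delta_0_opt; infer_instance

-- ===== CLAIM (what is proved, stated in full; the proofs are below) =====
def Claim_equal_get_conf_max_delta_0_opt : Prop := ∀ (d : String) (conf_dict : List (String × Int)) (v_children : List String), Dom_get_conf_max_delta_0_opt d conf_dict v_children → Spec_get_conf_max_delta_0_opt d conf_dict v_children (get_conf_max_delta_0_opt d conf_dict v_children)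

-- ===== LEMMAS AND PROOFS =====

-- A's loop body, B's pass-1 body and B's pass-2 body, named for the proofs
def pvStepA (f : String → Option Int) (st : Int × PySem.Set String) (c : String) : Int × PySem.Set String :=
  match f c with
  | some v =>
      if v > st.1 then (v, PySem.Set.add PySem.Set.empty c)
      else if v = st.1 then (st.1, PySem.Set.add st.2 c)
      else st
  | none => st

def pvStepM (f : String → Option Int) (m : Int) (c : String) : Int :=
  match f c with
  | some v => max m v
  | none => m

def pvStepS (f : String → Option Int) (b : Int) (s : PySem.Set String) (c : String) : PySem.Set String :=
  if f c = some b then PySem.Set.add s c else s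

theorem pvStepA_some (f : String → Option Int) (st : Int × PySem.Set String) (c : String) (v : Int)
    (h : f c = some v) :
    pvStepA f st c = if v > st.1 then (v, PySem.Set.add PySem.Set.empty c)
      else if v = st.1 then (st.1, PySem.Set.add st.2 c) else st := by
  simp [pvStepA, h]

theorem pvStepA_none (f : String → Option Int) (st : Int × PySem.Set String) (c : String)
    (h : f c = none) : pvStepA f st c = st := by
  simp [pvStepA, h]

theorem pvStepM_some (f : String → Option Int) (m : Int) (c : String) (v : Int)
    (h : f c = some v) : pvStepM f m c = max m v := by
  simp [pvStepM, h]

theorem pvStepM_none (f : String → Option Int) (m : Int) (c : String)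
    (h : f c = none) : pvStepM f m c = m := by
  simp [pvStepM, h]

-- pass-1 accumulator only grows
theorem pvMax_le_foldl (f : String → Option Int) :
    ∀ (cs : List String) (m : Int), m ≤ cs.foldl (pvStepM f) m := by
  intro cs
  induction cs with
  | nil => intro m; simp
  | cons c cs ih =>
      intro m
      simp only [List.foldl_cons]
      refine le_trans ?_ (ih (pvStepM f m c))
      cases h : f c with
      | none => rw [pvStepM_none f m c h]
      | some v => rw [pvStepM_some f m c v h]; exact le_max_left m v

-- A's fold from any state (m, s) = (pass-1 max from m, pass-2 filter for that max,
-- restarted from ∅ iff the max strictly exceeded m)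
theorem pvFold_eq (f : String → Option Int) :
    ∀ (cs : List String) (m : Int) (s : PySem.Set String),
      cs.foldl (pvStepA f) (m, s)
      = (cs.foldl (pvStepM f) m,
         cs.foldl (pvStepS f (cs.foldl (pvStepM f) m))
           (if cs.foldl (pvStepM f) m = m then s else PySem.Set.empty)) := by
  intro cs
  induction cs with
  | nil => intro m s; simp
  | cons c cs ih =>
      intro m s
      simp only [List.foldl_cons]
      cases h : f c with
      | none =>
          simp only [pvStepA_none f (m, s) c h, pvStepM_none f m c h]
          rw [ih]
          simp only [pvStepS, h]
          simp
      | some v =>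
          simp only [pvStepA_some f (m, s) c v h, pvStepM_some f m c v h]
          by_cases hv : v > m
          · -- update: max becomes v, set restarts at {c}
            have hmax : max m v = v := by omega
            have hM := pvMax_le_foldl f cs v
            rw [if_pos hv]
            simp only [hmax]
            rw [ih]
            have hMm : ¬ (cs.foldl (pvStepM f) v = m) := by omega
            rw [if_neg hMm]
            simp only [pvStepS, h]
            by_cases hveq : cs.foldl (pvStepM f) v = v
            · rw [if_pos hveq, if_pos (by rw [hveq])]
            · rw [if_neg hveq, if_neg (by intro hc; exact hveq (Option.some.inj hc).symm)]
          · rw [if_neg hv]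
            by_cases heq : v = m
            · -- tie with current max: add to the current set
              rw [if_pos heq]
              have hmax : max m v = m := by omega
              simp only [hmax]
              rw [ih]
              simp only [pvStepS, h]
              by_cases hveq : cs.foldl (pvStepM f) m = m
              · rw [if_pos hveq, if_pos hveq, if_pos (by rw [heq, hveq])]
              · rw [if_neg hveq, if_neg hveq,
                    if_neg (by intro hc; have h2 := Option.some.inj hc; omega)]
            · -- strictly smaller: state unchanged, and v can never equal the final max
              rw [if_neg heq]
              have hM := pvMax_le_foldl f cs m
              have hmax : max m v = m := by omega
              simp only [hmax]
              rw [ih]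
              simp only [pvStepS, h]
              have hne : ¬ (some v = some (List.foldl (pvStepM f) m cs)) := by
                intro hc; have h2 := Option.some.inj hc; omega
              rw [if_neg hne]

-- B's pass 1 over vals = exactly pvStepM over the children
theorem pvBest_eq (f : String → Option Int) (cs : List String) :
    (cs.map f).foldl (fun m v? =>
        match v? with
        | some v => if v > m then v else m
        | none => m) 0
    = cs.foldl (pvStepM f) 0 := by
  rw [List.foldl_map]
  have hfun : (fun (m : Int) c =>
      match f c with
      | some v => if v > m then v else m
      | none => m) = pvStepM f := by
    funext m c
    cases h : f c with
    | none => simp [pvStepM, h]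
    | some v => simp only [pvStepM, h]; rw [max_def]; split_ifs <;> omega
  rw [hfun]

-- B's pass 2 over the zip = pvStepS over the children
theorem pvZipFold (f : String → Option Int) (b : Int) :
    ∀ (cs : List String) (s : PySem.Set String),
      (cs.zip (cs.map f)).foldl
        (fun (s : PySem.Set String) (p : String × Option Int) =>
          if p.2 = some b then PySem.Set.add s p.1 else s) s
      = cs.foldl (pvStepS f b) s := by
  intro cs
  induction cs with
  | nil => intro s; rfl
  | cons c cs ih =>
      intro s
      simp only [List.map_cons, List.zip_cons_cons, List.foldl_cons]
      rw [ih]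
      rfl

-- ===== VERDICT (by name: the statement is the Claim_ definition above) =====
theorem get_conf_max_delta_0_opt_spec : Claim_equal_get_conf_max_delta_0_opt := by
  intro d conf_dict v_children _
  unfold Spec_get_conf_max_delta_0_opt get_conf_max_delta_0_opt get_conf_max_delta_0_opt_alt
  show (v_children.foldl (pvStepA (fun child => (PySem.Dict.mk conf_dict).get? (d ++ child))) (0, PySem.Set.empty)).2
    = (v_children.zip (v_children.map (fun child => (PySem.Dict.mk conf_dict).get? (d ++ child)))).foldl
        (fun (s : PySem.Set String) (p : String × Option Int) =>
          if p.2 = some ((v_children.map (fun child => (PySem.Dict.mk conf_dict).get? (d ++ child))).foldl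
              (fun m v? => match v? with | some v => if v > m then v else m | none => m) 0)
          then PySem.Set.add s p.1 else s) PySem.Set.empty
  rw [pvFold_eq (fun child => (PySem.Dict.mk conf_dict).get? (d ++ child)),
      pvBest_eq (fun child => (PySem.Dict.mk conf_dict).get? (d ++ child)),
      pvZipFold (fun child => (PySem.Dict.mk conf_dict).get? (d ++ child))]
  show List.foldl (pvStepS _ _) _ _ = List.foldl (pvStepS _ _) PySem.Set.empty _
  split <;> rfl
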